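-- pv_equiv track=rewrite | github.com/alex1770/Covid-19 | VOCvaccines/vocefficacy.py | agetogroup
-- ===== SOURCE A (Python) =====
-- def agetogroup(x):
--   try:
--     a=int(x)
--   except ValueError:
--     return -1
--   l=[18,30,40,50,65,75,999]
--   for (i,y) in enumerate(l):
--     if a<y: return i
-- ===== SOURCE B (Python) =====
-- def agetogroup(x):
--   try:
--     a = int(x)
--   except ValueError:
--     return -1
--   thresholds = [18, 30, 40, 50, 65, 75, 999]
--   lo, hi = 0, len(thresholds)
--   while lo < hi:
--     mid = (lo + hi) // 2
--     if a < thresholds[mid]: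
--       hi = mid
--     else:
--       lo = mid + 1
--   return lo
-- ===== Notes on version B (the rewrite author's own statement) =====
-- stated objective: alternative
-- what changed: Replaces the linear enumerate-scan over the threshold list with a hand-written binary search (bisect_right) over the same thresholds.
-- outside the precondition, e.g. on agetogroup('999'): A returns None, B returns 7; on agetogroup('1000'): A returns None, B returns 7
import Mathlib
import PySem

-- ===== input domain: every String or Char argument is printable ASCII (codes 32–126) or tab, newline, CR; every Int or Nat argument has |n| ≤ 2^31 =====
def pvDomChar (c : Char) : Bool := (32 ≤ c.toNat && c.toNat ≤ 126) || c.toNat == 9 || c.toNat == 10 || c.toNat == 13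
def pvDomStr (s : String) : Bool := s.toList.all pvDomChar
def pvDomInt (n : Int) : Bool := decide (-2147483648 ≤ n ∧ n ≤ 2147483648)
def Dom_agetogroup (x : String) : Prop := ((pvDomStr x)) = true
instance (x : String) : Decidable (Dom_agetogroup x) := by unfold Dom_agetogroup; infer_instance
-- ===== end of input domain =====

-- B replaces A's linear enumerate-scan over the fixed threshold list with a binary search
-- (bisect_right) over the same thresholds; return values are identical on Pre_.

-- ===== PORT A =====
-- the for-loop over enumerate(l): first index i with a < y; [] = fall-through (A returns None,
-- excluded by Pre_), the port's value there (-2) is arbitrary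
def agetogroupLoop (a : Int) : List (Int × Int) → Int
  | [] => -2
  | (i, y) :: rest => if a < y then i else agetogroupLoop a rest

def agetogroup (x : String) : Int :=
  match PySem.Int.ofStr? x with
  | none => -1
  | some a => agetogroupLoop a (PySem.List.enumerate [18, 30, 40, 50, 65, 75, 999])

-- ===== PORT B =====
-- the while lo < hi binary-search loop of Source B
def agetogroupBs (a : Int) (lo hi : Nat) : Nat :=
  if lo < hi then
    let mid := (lo + hi) / 2
    if a < ([18, 30, 40, 50, 65, 75, 999] : List Int).getD mid 0 then
      agetogroupBs a lo mid
    else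
      agetogroupBs a (mid + 1) hi
  else lo
termination_by hi - lo
decreasing_by all_goals omega

def agetogroup_alt (x : String) : Int :=
  match PySem.Int.ofStr? x with
  | none => -1
  | some a => (agetogroupBs a 0 7 : Int)

-- ===== PRECONDITION & SPEC =====
-- Pre_ excludes inputs parsing to an int ≥ 999: there A falls off the loop and returns None,
-- which is not a value of the declared Int type.
def Pre_agetogroup (x : String) : Prop :=
  ∀ a : Int, PySem.Int.ofStr? x = some a → a < 999
instance (x : String) : Decidable (Pre_agetogroup x) := by
  unfold Pre_agetogroup
  exact match h : PySem.Int.ofStr? x with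
    | none => isTrue (fun a ha => nomatch ha)
    | some a =>
      if hl : a < 999 then
        isTrue (fun b hb => by cases Option.some.inj hb; omega)
      else isFalse (fun hp => hl (hp a rfl))

def pvWitness_agetogroup : String := "64"

def Spec_agetogroup (x : String) (out : Int) : Prop := out = agetogroup_alt x
instance (x : String) (out : Int) : Decidable (Spec_agetogroup x out) := by unfold Spec_agetogroup; infer_instance

-- ===== CLAIM (what is proved, stated in full; the proofs are below) =====
def Claim_equal_agetogroup : Prop := ∀ (x : String), Dom_agetogroup x → Pre_agetogroup x → Spec_agetogroup x (agetogroup x)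

-- ===== LEMMAS AND PROOFS =====
lemma core_eq (a : Int) (h : a < 999) :
    agetogroupLoop a (PySem.List.enumerate [18, 30, 40, 50, 65, 75, 999]) = (agetogroupBs a 0 7 : Int) := by
  by_cases h1 : a < 18 <;> by_cases h2 : a < 30 <;> by_cases h3 : a < 40 <;>
    by_cases h4 : a < 50 <;> by_cases h5 : a < 65 <;> by_cases h6 : a < 75 <;>
    simp_all [PySem.List.enumerate, agetogroupLoop, agetogroupBs] <;> omega

-- ===== VERDICT (by name: the statement is the Claim_ definition above) =====
theorem agetogroup_spec : Claim_equal_agetogroup := by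
  intro x _ hpre
  unfold Spec_agetogroup agetogroup agetogroup_alt
  cases h : PySem.Int.ofStr? x with
  | none => rfl
  | some a => exact core_eq a (hpre a h)
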